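-- pv_equiv track=rewrite | github.com/WhiteAu/PhrasePicker | utils/stringparser.py | sieve_dict_for_sub_phrases
-- ===== SOURCE A (Python) =====
-- import collections
--
-- def sieve_dict_for_sub_phrases(dictionary):
--     """
--     sieve a dictionary for keys that are substrings of other keys
--
--     :param dictionary: Some Dictionary or Counter to sieve
--     :return: a new Counter with only the keys that passed the sieve
--
--     >>> x = {"car": 0, "magic carpet":1, "the car port":2, "cargo plane":3, "the car port at house": 4}
--     >>> y = sieve_dict_for_sub_phrases(x)
--     >>> y
--     Counter({'the car port at house': 4, 'cargo plane': 3, 'magic carpet': 1})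
--     """
--
--     #get keys
--     strings = dictionary.keys()
--     sieved_set = set(dictionary.keys())
--     #sort by length
--     strings = sorted(strings, key=len)
--     #for each phrase, check if its a substring of a larger phrase
--     for i in range(len(strings)-1): #no need to check last string
--         check_string = strings[i]
--         if is_phrase_a_substring_in_list(check_string, strings[i+1:]):
--             sieved_set.discard(check_string)
--
--     return collections.Counter({key:dictionary[key] for key in sieved_set})
--
-- def is_phrase_a_substring_in_list(phrase, check_list):
--     """
--
--     :param phrase: string to check if Substring
--     :param check_list: list of strings to check against
--     :return: True if phrase is a substring of any in check_list, otherwise false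
--
--     >>> x = ["apples", "bananas", "coconuts"]
--     >>> is_phrase_a_substring_in_list("app", x)
--     True
--
--     >>> is_phrase_a_substring_in_list("blue", x)
--     False
--     """
--     return any(phrase in x for x in check_list)
-- ===== SOURCE B (Python) =====
-- import collections
--
-- def sieve_dict_for_sub_phrases(dictionary):
--     """Keep only the keys that are not substrings of another key (insertion order)."""
--     keys = list(dictionary)
--     return collections.Counter(
--         {k: v for k, v in dictionary.items()
--          if not any(k in t for t in keys if t != k)})
-- ===== Notes on version B (the rewrite author's own statement) =====
-- stated objective: simpler
-- what changed: B drops the sort, the slices and the mutable set: one comprehension keeps each key-value pair whose key is not a substring of any other key, in insertion order (the result is a dict, compared ignoring order, so A's set-iteration order is immaterial).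
import Mathlib
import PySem

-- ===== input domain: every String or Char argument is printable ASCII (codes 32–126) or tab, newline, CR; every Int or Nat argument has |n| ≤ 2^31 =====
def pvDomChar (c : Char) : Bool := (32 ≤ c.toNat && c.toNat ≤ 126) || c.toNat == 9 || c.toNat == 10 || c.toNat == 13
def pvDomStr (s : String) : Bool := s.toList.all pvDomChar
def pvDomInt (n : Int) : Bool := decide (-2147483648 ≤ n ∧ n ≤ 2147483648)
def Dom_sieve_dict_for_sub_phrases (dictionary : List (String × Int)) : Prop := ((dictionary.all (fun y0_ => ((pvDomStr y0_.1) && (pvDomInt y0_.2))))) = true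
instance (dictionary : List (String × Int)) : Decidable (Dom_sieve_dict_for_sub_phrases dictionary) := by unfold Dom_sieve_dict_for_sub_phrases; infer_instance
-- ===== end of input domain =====

-- B drops A's sort, slices and mutable set: one filter keeps each key that is not a substring of
-- another key. Equal RETURN VALUE as dicts: the result is a dict/Counter (compared ignoring order),
-- so the set-iteration order of A's final comprehension is not observable; the ports realise it as
-- first-insertion order on both sides.

-- ===== PORT A =====
def is_phrase_a_substring_in_list (phrase : String) (check_list : List String) : Bool :=
  -- any(phrase in x for x in check_list)
  check_list.any (fun x => PySem.Str.isIn phrase x)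

def sieve_dict_for_sub_phrases (dictionary : List (String × Int)) : List (String × Int) :=
  let d := PySem.Dict.ofList dictionary
  -- sieved_set = set(dictionary.keys())
  let sieved_set : PySem.Set String := PySem.Set.ofList d.keys
  -- strings = sorted(strings, key=len)
  let strings := PySem.List.sorted d.keys (fun s => PySem.Str.len s)
  -- for i in range(len(strings)-1): …
  let sieved_set := (PySem.List.pyRange 0 ((strings.length : Int) - 1)).foldl
    (fun sieved i =>
      match PySem.List.pyGet? strings i with   -- check_string = strings[i] (always in range)
      | some check_string =>
          if is_phrase_a_substring_in_list check_string
               (PySem.List.slice strings (some (i + 1)) none)   -- strings[i+1:]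
          then PySem.Set.discard sieved check_string
          else sieved
      | none => sieved) sieved_set
  -- Counter({key: dictionary[key] for key in sieved_set}); Python iterates the set in hash order,
  -- which the returned dict (compared ignoring order) does not expose; here: first-insertion order.
  -- dictionary[key] never raises: every key of sieved_set is a key of d, so getD's default is unreachable.
  sieved_set.map (fun key => (key, d.getD key 0))

-- ===== PORT B =====
def sieve_dict_for_sub_phrases_alt (dictionary : List (String × Int)) : List (String × Int) :=
  let d := PySem.Dict.ofList dictionary
  -- keys = list(dictionary)
  let keys := d.keys
  -- Counter({k: v for k, v in dictionary.items() if not any(k in t for t in keys if t != k)})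
  d.items.filter (fun kv => !(keys.any (fun t => decide (t ≠ kv.1) && PySem.Str.isIn kv.1 t)))

-- ===== PRECONDITION & SPEC =====
def Spec_sieve_dict_for_sub_phrases (dictionary : List (String × Int)) (out : List (String × Int)) : Prop := out = sieve_dict_for_sub_phrases_alt dictionary
instance (dictionary : List (String × Int)) (out : List (String × Int)) : Decidable (Spec_sieve_dict_for_sub_phrases dictionary out) := by unfold Spec_sieve_dict_for_sub_phrases; infer_instance

-- ===== CLAIM (what is proved, stated in full; the proofs are below) =====
def Claim_equal_sieve_dict_for_sub_phrases : Prop := ∀ (dictionary : List (String × Int)), Dom_sieve_dict_for_sub_phrases dictionary → Spec_sieve_dict_for_sub_phrases dictionary (sieve_dict_for_sub_phrases dictionary)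

-- ===== LEMMAS AND PROOFS =====

-- set(xs) of a duplicate-free list is the list itself.

lemma setOfList_of_nodup {α : Type} [BEq α] [LawfulBEq α] (xs : List α) (h : xs.Nodup) :
    PySem.Set.ofList xs = xs := by
  induction xs with
  | nil => rfl
  | cons x xs ih =>
    rcases List.nodup_cons.mp h with ⟨hx, hxs⟩
    rw [PySem.Set.ofList_cons, ih hxs]
    simp [PySem.Set.discard, List.filter_eq_self]
    intro y hy hyx
    exact hx (hyx ▸ hy)

lemma foldl_discard_eq_filter (l : List Int) (g : Int → Option String) (c : Int → String → Bool)
    (s : PySem.Set String) :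
    l.foldl (fun sieved i =>
        match g i with
        | some x => if c i x then PySem.Set.discard sieved x else sieved
        | none => sieved) s
    = s.filter (fun k => !(l.any (fun i =>
        match g i with
        | some x => c i x && x == k
        | none => false))) := by
  induction l generalizing s with
  | nil => simp
  | cons a l ih =>
    rw [List.foldl_cons, ih]
    cases hga : g a with
    | none => simp [hga]
    | some x =>
      by_cases hc : c a x = true
      · simp only [hga, hc, if_true, PySem.Set.discard, List.filter_filter, List.any_cons]
        apply List.filter_congr
        intro k _
        simp [Bool.and_comm, show (x == k) = (k == x) by simp [eq_comm]]
      · simp only [Bool.not_eq_true] at hc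
        simp [hga, hc]

-- The loop's discard condition for a key k of the dict is exactly "k is a substring of another key".
lemma bad_iff (ks : List String) (hnd : ks.Nodup) (k : String) (hk : k ∈ ks) :
    ((PySem.List.pyRange 0 (((PySem.List.sorted ks (fun s => PySem.Str.len s)).length : Int) - 1)).any
      (fun i =>
        match PySem.List.pyGet? (PySem.List.sorted ks (fun s => PySem.Str.len s)) i with
        | some x => is_phrase_a_substring_in_list x
            (PySem.List.slice (PySem.List.sorted ks (fun s => PySem.Str.len s)) (some (i + 1)) none)
            && x == k
        | none => false))
    = (ks.any (fun t => decide (t ≠ k) && PySem.Str.isIn k t)) := by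
  set strings := PySem.List.sorted ks (fun s => PySem.Str.len s) with hstr
  have hperm : strings.Perm ks := PySem.List.sorted_perm ks _ false
  have hnds : strings.Nodup := hperm.symm.nodup hnd
  have hpw : strings.Pairwise (fun a b => PySem.Str.len a ≤ PySem.Str.len b) :=
    hstr ▸ PySem.List.sorted_pairwise ks (fun s => PySem.Str.len s)
  have hlen : ∀ m : Nat, (h : m < strings.length) →
      is_phrase_a_substring_in_list strings[m]
        (PySem.List.slice strings (some ((m : Int) + 1)) none)
      = (strings.drop (m+1)).any (fun t => PySem.Str.isIn strings[m] t) := by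
    intro m h
    have : ((m : Int) + 1) = ((m + 1 : Nat) : Int) := by push_cast; ring
    rw [this, PySem.List.slice_from_natCast]
    rfl
  apply Bool.eq_iff_iff.mpr
  simp only [List.any_eq_true]
  constructor
  · rintro ⟨i, hi, hcond⟩
    obtain ⟨hi0, hiub⟩ := PySem.List.mem_pyRange_one.mp hi
    have hmi : ((i.toNat : Int)) = i := Int.toNat_of_nonneg hi0
    set m := i.toNat with hm
    have hmlt : m < strings.length := by omega
    have hget : PySem.List.pyGet? strings i = some strings[m] := by
      rw [← hmi, PySem.List.pyGet?_natCast]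
      simp [hmlt]
    rw [hget] at hcond
    simp only [Bool.and_eq_true, beq_iff_eq] at hcond
    obtain ⟨hsub, hxk⟩ := hcond
    rw [← hmi] at hsub
    rw [hlen m hmlt] at hsub
    simp only [List.any_eq_true] at hsub
    obtain ⟨t, htmem, htsub⟩ := hsub
    refine ⟨t, hperm.mem_iff.mp (List.mem_of_mem_drop htmem), ?_⟩
    have htk : t ≠ k := by
      intro he
      obtain ⟨j, hj, hjt⟩ := List.mem_iff_getElem.mp htmem
      rw [List.getElem_drop] at hjt
      have : m + 1 + j = m := by
        apply (List.Nodup.getElem_inj_iff hnds).mp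
        rw [hjt, hxk, he]
      omega
    rw [hxk] at htsub
    simp [htk]
    simpa using htsub
  · rintro ⟨t, ht, hcond⟩
    simp only [Bool.and_eq_true, decide_eq_true_eq] at hcond
    obtain ⟨htk, hsub⟩ := hcond
    have hinf : k.toList <:+: t.toList := (PySem.Str.isIn_iff_infix k t).mp hsub
    have hlt : k.toList.length < t.toList.length := by
      rcases Nat.lt_or_ge k.toList.length t.toList.length with h | h
      · exact h
      · exfalso
        have := hinf.eq_of_length (Nat.le_antisymm hinf.length_le h)
        exact htk (String.toList_inj.mp this).symm
    obtain ⟨ik, hik, hikk⟩ := List.mem_iff_getElem.mp (hperm.mem_iff.mpr hk)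
    obtain ⟨it, hit, hitt⟩ := List.mem_iff_getElem.mp (hperm.mem_iff.mpr ht)
    have hiklt : ik < it := by
      rcases Nat.lt_trichotomy ik it with h | h | h
      · exact h
      · exfalso
        apply htk
        rw [← hitt, ← hikk]
        congr 1
        omega
      · exfalso
        have := (List.pairwise_iff_getElem.mp hpw) it ik hit hik h
        simp only [hikk, hitt, PySem.Str.len_eq] at this
        omega
    refine ⟨(ik : Int), PySem.List.mem_pyRange_one.mpr ⟨by positivity, by omega⟩, ?_⟩
    have hget : PySem.List.pyGet? strings (ik : Int) = some strings[ik] := by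
      rw [PySem.List.pyGet?_natCast]; simp [hik]
    rw [hget]
    show (is_phrase_a_substring_in_list strings[ik]
        (PySem.List.slice strings (some ((ik : Int) + 1)) none) && (strings[ik] == k)) = true
    have hdrop : t ∈ strings.drop (ik + 1) := by
      have hgd : (strings.drop (ik+1))[it - (ik+1)]'(by simp; omega) = strings[it] := by
        rw [List.getElem_drop]; congr 1; omega
      rw [← hitt, ← hgd]
      exact List.getElem_mem _
    simp only [Bool.and_eq_true, beq_iff_eq]
    refine ⟨?_, hikk⟩
    rw [hlen ik hik]
    simp only [List.any_eq_true]
    exact ⟨t, hdrop, by rw [hikk]; exact hsub⟩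

-- ===== VERDICT (by name: the statement is the Claim_ definition above) =====
theorem sieve_dict_for_sub_phrases_spec : Claim_equal_sieve_dict_for_sub_phrases := by
  intro dictionary _
  unfold Spec_sieve_dict_for_sub_phrases sieve_dict_for_sub_phrases sieve_dict_for_sub_phrases_alt
  simp only
  have hnd := PySem.Dict.nodup_keys_ofList dictionary
  rw [foldl_discard_eq_filter, setOfList_of_nodup _ hnd,
      PySem.Dict.items_eq_map_keys _ hnd (0 : Int), List.filter_map]
  refine congrArg (List.map _) (List.filter_congr ?_)
  intro k hk
  simp only [Function.comp]
  exact congrArg (fun b => !b) (bad_iff _ hnd k hk)
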